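-- pv_equiv track=rewrite | github.com/ReneFabricius/project-euler | pr577.py | hexagons
-- ===== SOURCE A (Python) =====
-- def hexagons(m):
--     s = 0
--     c = 0
--     for n in range(3, m + 1):
--         for i in range(1, int(n/3) + 1):
--             c += (n - (i * 3 - 1)) * i
--         s += c
--     return s
-- ===== SOURCE B (Python) =====
-- def hexagons(m):
--     # A accumulates a running inner sum c and then prefix-sums it.  B removes both
--     # accumulators: s(m) = sum over n of (m - n + 1) copies of the inner sum g(n),
--     # and g(n) has the closed form k*(k+1)*(n-2k)/2 with k = n//3.
--     total = 0
--     for n in range(3, m + 1):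
--         k = n // 3
--         total += (m - n + 1) * (k * (k + 1) * (n - 2 * k) // 2)
--     return total
-- ===== Notes on version B (the rewrite author's own statement) =====
-- stated objective: faster
-- what changed: A's prefix-sum-of-prefix-sums with a nested loop is replaced by a single weighted sum: each closed-form inner sum g(n)=k(k+1)(n-2k)/2 (k=n//3) is counted with multiplicity m-n+1, removing both the inner loop and the running accumulator c.
import Mathlib
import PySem

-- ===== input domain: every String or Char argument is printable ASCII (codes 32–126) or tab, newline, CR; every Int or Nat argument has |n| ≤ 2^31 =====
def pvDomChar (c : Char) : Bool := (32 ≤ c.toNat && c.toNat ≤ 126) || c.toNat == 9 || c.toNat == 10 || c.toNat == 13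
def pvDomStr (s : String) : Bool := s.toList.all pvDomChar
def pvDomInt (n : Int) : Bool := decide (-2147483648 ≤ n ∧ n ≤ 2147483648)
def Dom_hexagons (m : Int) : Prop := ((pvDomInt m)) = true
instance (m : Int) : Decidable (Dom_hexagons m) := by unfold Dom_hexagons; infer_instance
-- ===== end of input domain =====

-- B replaces A's nested loop with running accumulator c by a single weighted sum of the
-- closed-form inner sums (objective: faster, asymptotic O(m^2) -> O(m)).

-- ===== PORT A =====
-- Note: Python's `int(n/3)` equals floor division n//3 for every n in range(3, m+1) with
-- m ≤ 2^31 (the float quotient's rounding error is far below 1/3), so it is ported as floordiv n 3.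
def hexagons (m : Int) : Int :=
  ((PySem.List.pyRange 3 (m + 1) 1).foldl
    (fun (sc : Int × Int) n =>
      let c := (PySem.List.pyRange 1 (PySem.Int.floordiv n 3 + 1) 1).foldl
        (fun c i => c + (n - (i * 3 - 1)) * i) sc.2
      (sc.1 + c, c))
    (0, 0)).1

-- ===== PORT B =====
def hexagons_alt (m : Int) : Int :=
  (PySem.List.pyRange 3 (m + 1) 1).foldl
    (fun total n =>
      let k := PySem.Int.floordiv n 3
      total + (m - n + 1) * PySem.Int.floordiv (k * (k + 1) * (n - 2 * k)) 2)
    0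

-- ===== PRECONDITION & SPEC =====
def Spec_hexagons (m : Int) (out : Int) : Prop := out = hexagons_alt m
instance (m : Int) (out : Int) : Decidable (Spec_hexagons m out) := by unfold Spec_hexagons; infer_instance

-- ===== CLAIM (what is proved, stated in full; the proofs are below) =====
def Claim_equal_hexagons : Prop := ∀ (m : Int), Dom_hexagons m → Spec_hexagons m (hexagons m)

-- ===== LEMMAS AND PROOFS =====

-- the closed form of A's inner sum: g(n) = k(k+1)(n-2k)/2 with k = n // 3 (exact division)
def pvG (n : Int) : Int :=
  let k := n / 3
  k * (k + 1) * (n - 2 * k) / 2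

-- C N = Σ_{j<N} g(3+j)  (A's variable c after the n = 3 .. 2+N iterations)
def pvC : Nat → Int
  | 0 => 0
  | N + 1 => pvC N + pvG (3 + N)

-- S N = Σ_{j<N} C (j+1)  (A's variable s after those iterations)
def pvS : Nat → Int
  | 0 => 0
  | N + 1 => pvS N + pvC (N + 1)

-- A's inner loop in closed form: from c it adds k(k+1)(n-2k)/2 where the range bound is k+1.
lemma pvInnerSum (n : Int) (k : Nat) (c : Int) :
    (PySem.List.pyRange 1 ((k : Int) + 1) 1).foldl
        (fun c i => c + (n - (i * 3 - 1)) * i) c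
      = c + (k : Int) * ((k : Int) + 1) * (n - 2 * (k : Int)) / 2 := by
  induction k generalizing c with
  | zero =>
      simp [PySem.List.pyRange_one_eq_nil (by norm_num : (1:Int) ≤ 1)]
  | succ k ih =>
      have hb : (1 : Int) ≤ (k : Int) + 1 := by omega
      have : ((k + 1 : Nat) : Int) + 1 = ((k : Int) + 1) + 1 := by push_cast; ring
      rw [this, PySem.List.pyRange_one_succ_right hb, List.foldl_append, ih]
      simp only [List.foldl_cons, List.foldl_nil]
      obtain ⟨e, he⟩ : (2 : Int) ∣ (k : Int) * ((k : Int) + 1) := (Int.even_mul_succ_self (k : Int)).two_dvd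
      obtain ⟨e', he'⟩ : (2 : Int) ∣ ((k : Int) + 1) * (((k : Int) + 1) + 1) :=
        (Int.even_mul_succ_self ((k : Int) + 1)).two_dvd
      have he2 : (k : Int) * ((k : Int) + 1) = 2 * e := by omega
      have he2' : ((k : Int) + 1) * (((k : Int) + 1) + 1) = 2 * e' := by omega
      have h1 : (k : Int) * ((k : Int) + 1) * (n - 2 * (k : Int)) = 2 * (e * (n - 2 * (k : Int))) := by
        rw [he2]; ring
      have h2 : ((k : Int) + 1) * (((k : Int) + 1) + 1) * (n - 2 * ((k : Int) + 1))
          = 2 * (e' * (n - 2 * ((k : Int) + 1))) := by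
        rw [he2']; ring
      push_cast
      rw [show ((k : Int) + 1) * ((k : Int) + 1 + 1) * (n - 2 * ((k : Int) + 1))
            = 2 * (e' * (n - 2 * ((k : Int) + 1))) from h2,
          show (k : Int) * ((k : Int) + 1) * (n - 2 * (k : Int))
            = 2 * (e * (n - 2 * (k : Int))) from h1,
          Int.mul_ediv_cancel_left _ (by norm_num : (2:Int) ≠ 0),
          Int.mul_ediv_cancel_left _ (by norm_num : (2:Int) ≠ 0)]
      have hee : e' = e + ((k : Int) + 1) := by
        have h3 : 2 * e' = 2 * e + 2 * ((k : Int) + 1) := by linear_combination he2 - he2'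
        omega
      rw [hee]
      linear_combination -he2

-- A's inner loop adds exactly pvG n, for n ≥ 0.
lemma pvInnerG (n : Int) (hn : 0 ≤ n) (c : Int) :
    (PySem.List.pyRange 1 (PySem.Int.floordiv n 3 + 1) 1).foldl
        (fun c i => c + (n - (i * 3 - 1)) * i) c
      = c + pvG n := by
  have hf : PySem.Int.floordiv n 3 = n / 3 :=
    PySem.Int.floordiv_eq_ediv_of_pos (by norm_num)
  have h0 : 0 ≤ n / 3 := Int.ediv_nonneg hn (by norm_num)
  obtain ⟨k, hk⟩ : ∃ k : Nat, n / 3 = (k : Int) := ⟨(n / 3).toNat, (Int.toNat_of_nonneg h0).symm⟩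
  rw [hf, hk, pvInnerSum n k c]
  simp [pvG, hk]

-- A's outer loop from any state, over n = 3 .. 2+N.
lemma pvAfold (N : Nat) (s c : Int) :
    (PySem.List.pyRange 3 (3 + (N : Int)) 1).foldl
      (fun (sc : Int × Int) n =>
        let c := (PySem.List.pyRange 1 (PySem.Int.floordiv n 3 + 1) 1).foldl
          (fun c i => c + (n - (i * 3 - 1)) * i) sc.2
        (sc.1 + c, c))
      (s, c)
    = (s + (N : Int) * c + pvS N, c + pvC N) := by
  induction N generalizing s c with
  | zero => simp [pvS, pvC]
  | succ N ih =>
      have hb : (3 : Int) ≤ 3 + (N : Int) := by omega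
      have hcast : (3 : Int) + ((N + 1 : Nat) : Int) = (3 + (N : Int)) + 1 := by push_cast; ring
      rw [hcast, PySem.List.pyRange_one_succ_right hb, List.foldl_append, ih]
      simp only [List.foldl_cons, List.foldl_nil]
      rw [pvInnerG (3 + (N : Int)) (by omega)]
      simp only [pvS, pvC, Prod.mk.injEq]
      push_cast
      constructor <;> ring

-- B's loop from any accumulator, over n = 3 .. 2+N, with the fixed weight base m.
lemma pvBfold (m : Int) (N : Nat) (t : Int) :
    (PySem.List.pyRange 3 (3 + (N : Int)) 1).foldl
      (fun total n =>
        let k := PySem.Int.floordiv n 3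
        total + (m - n + 1) * PySem.Int.floordiv (k * (k + 1) * (n - 2 * k)) 2)
      t
    = t + pvS N + (m - 2 - (N : Int)) * pvC N := by
  induction N generalizing t with
  | zero => simp [pvS, pvC]
  | succ N ih =>
      have hb : (3 : Int) ≤ 3 + (N : Int) := by omega
      have hcast : (3 : Int) + ((N + 1 : Nat) : Int) = (3 + (N : Int)) + 1 := by push_cast; ring
      rw [hcast, PySem.List.pyRange_one_succ_right hb, List.foldl_append, ih]
      simp only [List.foldl_cons, List.foldl_nil]
      have hf : PySem.Int.floordiv (3 + (N : Int)) 3 = (3 + (N : Int)) / 3 :=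
        PySem.Int.floordiv_eq_ediv_of_pos (by norm_num)
      have hf2 : ∀ x : Int, PySem.Int.floordiv x 2 = x / 2 :=
        fun x => PySem.Int.floordiv_eq_ediv_of_pos (by norm_num)
      simp only [hf, hf2, pvS, pvC, pvG]
      push_cast
      ring

-- ===== VERDICT (by name: the statement is the Claim_ definition above) =====
theorem hexagons_spec : Claim_equal_hexagons := by
  intro m _
  unfold Spec_hexagons hexagons hexagons_alt
  by_cases hm : m ≤ 2
  · have h : m + 1 ≤ 3 := by omega
    rw [PySem.List.pyRange_one_eq_nil h]
    simp
  · have h2 : 0 ≤ m - 2 := by omega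
    obtain ⟨N, hN⟩ : ∃ N : Nat, m - 2 = (N : Int) := ⟨(m - 2).toNat, (Int.toNat_of_nonneg h2).symm⟩
    have hm1 : m + 1 = 3 + (N : Int) := by omega
    rw [hm1, pvAfold N 0 0, pvBfold m N 0]
    have : m - 2 - (N : Int) = 0 := by omega
    rw [this]
    ring
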